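-- pv_equiv track=rewrite | github.com/highwayns/vibesdk | docs/excel_to_markdown.py | split_blocks_by_empty_rows
-- ===== SOURCE A (Python) =====
-- from typing import Any, Dict, Iterable, List, Optional, Sequence, Tuple
--
-- def is_blank(v: Any) -> bool:
--     if v is None:
--         return True
--     if isinstance(v, str) and v.strip() == "":
--         return True
--     return False
--
-- def row_nonempty_count(row: List[str]) -> int:
--     return sum(1 for c in row if not is_blank(c))
--
-- def split_blocks_by_empty_rows(grid: List[List[str]], empty_run: int = 2) -> List[List[List[str]]]:
--     blocks: List[List[List[str]]] = []
--     cur: List[List[str]] = []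
--     blanks = 0
--     for row in grid:
--         if row_nonempty_count(row) == 0:
--             blanks += 1
--             if cur and blanks >= empty_run:
--                 blocks.append(cur)
--                 cur = []
--         else:
--             blanks = 0
--             cur.append(row)
--     if cur:
--         blocks.append(cur)
--     return blocks
-- ===== SOURCE B (Python) =====
-- # B: idiomatic re-implementation via itertools.groupby over blank/non-blank runs
-- from itertools import groupby
-- from typing import Any, List
--
-- def is_blank(v: Any) -> bool:
--     if v is None:
--         return True
--     if isinstance(v, str) and v.strip() == "":
--         return True
--     return False
--
-- def row_nonempty_count(row: List[str]) -> int: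
--     return sum(1 for c in row if not is_blank(c))
--
-- def split_blocks_by_empty_rows(grid: List[List[str]], empty_run: int = 2) -> List[List[List[str]]]:
--     blocks: List[List[List[str]]] = []
--     cur: List[List[str]] = []
--     for run_is_blank, run in groupby(grid, key=lambda r: row_nonempty_count(r) == 0):
--         if run_is_blank:
--             if cur and sum(1 for _ in run) >= empty_run:
--                 blocks.append(cur)
--                 cur = []
--         else:
--             cur.extend(run)
--     if cur:
--         blocks.append(cur)
--     return blocks
-- ===== Notes on version B (the rewrite author's own statement) =====
-- stated objective: idiomatic
-- what changed: Replaces the per-row blank counter and in-loop flush logic with itertools.groupby: the grid is consumed as alternating blank/non-blank runs, each blank run cutting the current block iff its whole length reaches empty_run.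
import Mathlib
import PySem

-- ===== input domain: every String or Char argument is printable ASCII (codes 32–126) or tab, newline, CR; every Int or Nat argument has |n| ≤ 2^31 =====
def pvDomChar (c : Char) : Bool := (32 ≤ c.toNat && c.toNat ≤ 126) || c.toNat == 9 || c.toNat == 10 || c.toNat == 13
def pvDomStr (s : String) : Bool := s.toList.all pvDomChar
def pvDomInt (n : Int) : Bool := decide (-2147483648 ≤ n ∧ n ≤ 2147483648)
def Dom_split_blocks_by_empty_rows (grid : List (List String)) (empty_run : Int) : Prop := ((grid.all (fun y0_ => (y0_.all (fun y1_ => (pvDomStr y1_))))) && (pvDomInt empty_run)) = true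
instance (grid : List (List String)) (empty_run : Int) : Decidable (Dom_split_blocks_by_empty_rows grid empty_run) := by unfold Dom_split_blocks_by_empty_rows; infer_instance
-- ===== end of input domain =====

-- B replaces A's per-row blank counter with a groupby-style decomposition of the grid into
-- alternating blank/non-blank runs (idiomatic restructuring; same asymptotic cost).


-- ===== PORT A =====
-- shared helpers (the Python module's is_blank / row_nonempty_count, reused verbatim by B)
def is_blank (v : String) : Bool :=
  if PySem.Str.strip v == "" then true else false

def row_nonempty_count (row : List String) : Int :=
  row.foldl (fun acc c => if !is_blank c then acc + 1 else acc) 0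

def stepA (empty_run : Int)
    (s : List (List (List String)) × List (List String) × Int) (row : List String) :
    List (List (List String)) × List (List String) × Int :=
  if row_nonempty_count row == 0 then
    let blanks := s.2.2 + 1
    if s.2.1 ≠ [] ∧ empty_run ≤ blanks then (s.1 ++ [s.2.1], [], blanks)
    else (s.1, s.2.1, blanks)
  else (s.1, s.2.1 ++ [row], 0)

def split_blocks_by_empty_rows (grid : List (List String)) (empty_run : Int) : List (List (List String)) :=
  let s := grid.foldl (stepA empty_run) ([], [], 0)
  s.1 ++ (if s.2.1 ≠ [] then [s.2.1] else [])

-- ===== PORT B =====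
-- B's groupby key
def blankRow (row : List String) : Bool := row_nonempty_count row == 0

-- itertools.groupby(grid, key=blankRow): list of (key, run) pairs, runs maximal
def pyGroupRuns : List (List String) → List (Bool × List (List String))
  | [] => []
  | r :: rs =>
    (blankRow r, r :: rs.takeWhile (fun x => blankRow x == blankRow r)) ::
      pyGroupRuns (rs.dropWhile (fun x => blankRow x == blankRow r))
termination_by grid => grid.length
decreasing_by
  simpa using Nat.lt_succ_of_le (List.length_dropWhile_le _ _)

def stepB (empty_run : Int)
    (s : List (List (List String)) × List (List String)) (g : Bool × List (List String)) :
    List (List (List String)) × List (List String) :=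
  if g.1 then
    if s.2 ≠ [] ∧ empty_run ≤ (g.2.length : Int) then (s.1 ++ [s.2], []) else s
  else (s.1, s.2 ++ g.2)

def split_blocks_by_empty_rows_alt (grid : List (List String)) (empty_run : Int) : List (List (List String)) :=
  let s := (pyGroupRuns grid).foldl (stepB empty_run) ([], [])
  s.1 ++ (if s.2 ≠ [] then [s.2] else [])

-- ===== PRECONDITION & SPEC =====
def Spec_split_blocks_by_empty_rows (grid : List (List String)) (empty_run : Int) (out : List (List (List String))) : Prop := out = split_blocks_by_empty_rows_alt grid empty_run
instance (grid : List (List String)) (empty_run : Int) (out : List (List (List String))) : Decidable (Spec_split_blocks_by_empty_rows grid empty_run out) := by unfold Spec_split_blocks_by_empty_rows; infer_instance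

-- ===== CLAIM (what is proved, stated in full; the proofs are below) =====
def Claim_equal_split_blocks_by_empty_rows : Prop := ∀ (grid : List (List String)) (empty_run : Int), Dom_split_blocks_by_empty_rows grid empty_run → Spec_split_blocks_by_empty_rows grid empty_run (split_blocks_by_empty_rows grid empty_run)

-- ===== LEMMAS AND PROOFS =====

-- A over a run of blank rows, starting from blank-counter m: flushes iff cur ≠ [] and the
-- run is nonempty with empty_run ≤ m + its length; the counter ends at m + length.
theorem foldA_blank_run (er : Int) :
    ∀ (run : List (List String)), (∀ x ∈ run, blankRow x = true) →
    ∀ (blocks : List (List (List String))) (cur : List (List String)) (m : Int),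
    run.foldl (stepA er) (blocks, cur, m) =
      (if cur ≠ [] ∧ er ≤ m + run.length ∧ run ≠ [] then blocks ++ [cur] else blocks,
       if cur ≠ [] ∧ er ≤ m + run.length ∧ run ≠ [] then [] else cur,
       m + run.length) := by
  intro run
  induction run with
  | nil => intro _ blocks cur m; simp
  | cons r rest ih =>
    intro hall blocks cur m
    have hr : blankRow r = true := hall r (by simp)
    have hrest : ∀ x ∈ rest, blankRow x = true := fun x hx => hall x (by simp [hx])
    have hstep : stepA er (blocks, cur, m) r =
        (if cur ≠ [] ∧ er ≤ m + 1 then blocks ++ [cur] else blocks,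
         if cur ≠ [] ∧ er ≤ m + 1 then [] else cur, m + 1) := by
      simp only [stepA, blankRow] at hr ⊢
      rw [if_pos hr]
      split_ifs with h <;> simp
    rw [List.foldl_cons, hstep]
    by_cases h : cur ≠ [] ∧ er ≤ m + 1
    · rw [if_pos h, if_pos h, ih hrest]
      have hF : ¬(([] : List (List String)) ≠ [] ∧ er ≤ m + 1 + (rest.length : Int) ∧ rest ≠ []) := by simp
      have hT : cur ≠ [] ∧ er ≤ m + ((r :: rest).length : Int) ∧ (r :: rest) ≠ [] := by
        refine ⟨h.1, ?_, by simp⟩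
        have := h.2; push_cast [List.length_cons]; omega
      rw [if_neg hF, if_neg hF, if_pos hT, if_pos hT]
      simp only [Prod.mk.injEq]
      refine ⟨by trivial, by trivial, ?_⟩
      push_cast [List.length_cons]; omega
    · rw [if_neg h, if_neg h, ih hrest]
      by_cases hc : cur = []
      · subst hc
        simp only [ne_eq, not_true_eq_false, false_and, if_false, Prod.mk.injEq]
        refine ⟨by trivial, by trivial, ?_⟩
        push_cast [List.length_cons]; omega
      · have h2 : ¬ er ≤ m + 1 := fun hh => h ⟨hc, hh⟩
        have hiff : (cur ≠ [] ∧ er ≤ m + 1 + (rest.length : Int) ∧ rest ≠ []) ↔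
            (cur ≠ [] ∧ er ≤ m + ((r :: rest).length : Int) ∧ (r :: rest) ≠ []) := by
          constructor
          · rintro ⟨a, b, c⟩
            refine ⟨a, ?_, by simp⟩
            push_cast [List.length_cons] at b ⊢; omega
          · rintro ⟨a, b, c⟩
            refine ⟨a, by push_cast [List.length_cons] at b ⊢; omega, ?_⟩
            rcases rest with _ | ⟨y, ys⟩
            · exfalso; apply h2; push_cast [List.length_cons, List.length_nil] at b; omega
            · simp
        simp only [Prod.mk.injEq]
        refine ⟨if_congr hiff rfl rfl, if_congr hiff rfl rfl, ?_⟩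
        push_cast [List.length_cons]; omega

-- A over a run of non-blank rows: they are all appended to cur and the counter resets
-- (stays m only if the run is empty).
theorem foldA_nonblank_run (er : Int) :
    ∀ (run : List (List String)), (∀ x ∈ run, blankRow x = false) →
    ∀ (blocks : List (List (List String))) (cur : List (List String)) (m : Int),
    run.foldl (stepA er) (blocks, cur, m) =
      (blocks, cur ++ run, if run.isEmpty then m else 0) := by
  intro run
  induction run with
  | nil => intro _ blocks cur m; simp
  | cons r rest ih =>
    intro hall blocks cur m
    have hr : blankRow r = false := hall r (by simp)
    have hrest : ∀ x ∈ rest, blankRow x = false := fun x hx => hall x (by simp [hx])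
    have hstep : stepA er (blocks, cur, m) r = (blocks, cur ++ [r], 0) := by
      simp only [stepA, blankRow] at hr ⊢
      rw [if_neg (by simp [hr])]
    rw [List.foldl_cons, hstep, ih hrest]
    cases rest <;> simp

-- the initial blank counter is irrelevant when the next row is non-blank
theorem foldA_counter_irrel (er : Int) (x : List String) (xs : List (List String))
    (hx : blankRow x = false) (blocks : List (List (List String)))
    (cur : List (List String)) (m m' : Int) :
    (x :: xs).foldl (stepA er) (blocks, cur, m) = (x :: xs).foldl (stepA er) (blocks, cur, m') := by
  simp only [List.foldl_cons, stepA, blankRow] at hx ⊢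
  rw [if_neg (by simp [hx]), if_neg (by simp [hx])]

-- head of dropWhile fails the predicate
theorem head_dropWhile {α : Type} (p : α → Bool) :
    ∀ (l : List α) (x : α) (xs : List α), l.dropWhile p = x :: xs → p x = false := by
  intro l
  induction l with
  | nil => intro x xs h; simp [List.dropWhile] at h
  | cons a t ih =>
    intro x xs h
    rw [List.dropWhile_cons] at h
    split_ifs at h with ha
    · exact ih x xs h
    · cases h; simpa using ha

-- main invariant: A's fold (from counter 0) and B's fold over the runs agree on (blocks, cur)
theorem main_inv (er : Int) :
    ∀ (n : Nat) (grid : List (List String)), grid.length ≤ n →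
    ∀ (blocks : List (List (List String))) (cur : List (List String)),
    (let s := grid.foldl (stepA er) (blocks, cur, 0); (s.1, s.2.1)) =
      (pyGroupRuns grid).foldl (stepB er) (blocks, cur) := by
  intro n
  induction n with
  | zero =>
    intro grid hlen blocks cur
    have : grid = [] := List.eq_nil_of_length_eq_zero (Nat.le_zero.mp hlen)
    subst this; simp [pyGroupRuns]
  | succ n ih =>
    intro grid hlen blocks cur
    match grid with
    | [] => simp [pyGroupRuns]
    | r :: rs =>
      have hlen' : rs.length ≤ n := by simpa using hlen
      rw [pyGroupRuns]
      set p := fun x => blankRow x == blankRow r with hp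
      have hsplit : rs = rs.takeWhile p ++ rs.dropWhile p := (List.takeWhile_append_dropWhile).symm
      have htake : ∀ x ∈ rs.takeWhile p, blankRow x = blankRow r := by
        intro x hx
        have := List.mem_takeWhile_imp hx
        simpa [hp] using this
      have hdroplen : (rs.dropWhile p).length ≤ n :=
        le_trans (List.length_dropWhile_le _ _) hlen'
      have hdrophead : ∀ x xs, rs.dropWhile p = x :: xs → blankRow x ≠ blankRow r := by
        intro x xs h
        have := head_dropWhile p rs x xs h
        simpa [hp] using this
      have hgrid : (r :: rs).foldl (stepA er) (blocks, cur, 0) =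
          (rs.dropWhile p).foldl (stepA er)
            ((r :: rs.takeWhile p).foldl (stepA er) (blocks, cur, 0)) := by
        conv_lhs => rw [show (r :: rs) = (r :: rs.takeWhile p) ++ rs.dropWhile p by
          rw [List.cons_append]; congr 1]
        rw [List.foldl_append]
      cases hb : blankRow r with
      | true =>
        -- blank run
        have hallb : ∀ x ∈ r :: rs.takeWhile p, blankRow x = true := by
          intro x hx
          rcases List.mem_cons.mp hx with h | h
          · subst h; exact hb
          · rw [htake x h, hb]
        rw [hgrid, foldA_blank_run er _ hallb]
        set k : Int := ((r :: rs.takeWhile p).length : Int) with hk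
        have hcond : (cur ≠ [] ∧ er ≤ 0 + k ∧ (r :: rs.takeWhile p) ≠ []) ↔
            (cur ≠ [] ∧ er ≤ k) := by
          constructor
          · rintro ⟨a, b, _⟩; exact ⟨a, by omega⟩
          · rintro ⟨a, b⟩; exact ⟨a, by omega, by simp⟩
        have hstepB : stepB er (blocks, cur) (true, r :: rs.takeWhile p) =
            (if cur ≠ [] ∧ er ≤ k then blocks ++ [cur] else blocks,
             if cur ≠ [] ∧ er ≤ k then [] else cur) := by
          simp only [stepB, ← hk]
          split_ifs <;> rfl
        rw [List.foldl_cons, hstepB]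
        simp only [propext hcond]
        set blocks' := if cur ≠ [] ∧ er ≤ k then blocks ++ [cur] else blocks with hB
        set cur' := if cur ≠ [] ∧ er ≤ k then ([] : List (List String)) else cur with hC
        match hd : rs.dropWhile p with
        | [] => simp [pyGroupRuns]
        | x :: xs =>
          have hx : blankRow x = false := by
            have := hdrophead x xs hd; rw [hb] at this
            cases hxx : blankRow x
            · rfl
            · exact absurd hxx this
          rw [foldA_counter_irrel er x xs hx blocks' cur' (0 + k) 0]
          have := ih (x :: xs) (hd ▸ hdroplen) blocks' cur'
          exact this
      | false =>
        -- non-blank run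
        have hallb : ∀ x ∈ r :: rs.takeWhile p, blankRow x = false := by
          intro x hx
          rcases List.mem_cons.mp hx with h | h
          · subst h; exact hb
          · rw [htake x h, hb]
        rw [hgrid, foldA_nonblank_run er _ hallb]
        have hne : ((r :: rs.takeWhile p).isEmpty) = false := by simp
        rw [hne]
        have hstepB : stepB er (blocks, cur) (false, r :: rs.takeWhile p) =
            (blocks, cur ++ (r :: rs.takeWhile p)) := by
          simp [stepB]
        rw [List.foldl_cons, hstepB]
        simp only [Bool.false_eq_true, if_false]
        exact ih (rs.dropWhile p) hdroplen blocks (cur ++ (r :: rs.takeWhile p))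

-- ===== VERDICT (by name: the statement is the Claim_ definition above) =====
theorem split_blocks_by_empty_rows_spec : Claim_equal_split_blocks_by_empty_rows := by
  intro grid empty_run _
  unfold Spec_split_blocks_by_empty_rows split_blocks_by_empty_rows split_blocks_by_empty_rows_alt
  have h := main_inv empty_run grid.length grid (le_refl _) [] []
  simp only at h
  rw [← h]
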